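-- pv_equiv track=rewrite | github.com/FsterThanLight/Automated_office | 代表处日报/functions.py | ins_classification
-- ===== SOURCE A (Python) =====
-- def ins_classification(ins_info):
--     '''将已浇筑的梁片信息进行分类'''
--     if len(ins_info)==0:
--         pass
--     else:
--         installed_info=[]
--         be_12_25=[]
--         be_12_40=[]
--         be_13_25=[]
--         be_13_40=[]
--         be_14_25=[]
--         be_14_40=[]
--         be_15_25=[]
--         be_15_40=[]
--         for i in range(len(ins_info)):
--             if ins_info[i][3]=='25m' and ins_info[i][4]=='ZCB1-12':
--                 be_12_25.append(ins_info[i])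
--             elif ins_info[i][3]=='40m' and ins_info[i][4]=='ZCB1-12':
--                 be_12_40.append(ins_info[i])
--             elif ins_info[i][3]=='25m' and ins_info[i][4]=='ZCB1-13':
--                 be_13_25.append(ins_info[i])
--             elif ins_info[i][3]=='40m' and ins_info[i][4]=='ZCB1-13':
--                 be_13_40.append(ins_info[i])
--             elif ins_info[i][3]=='25m' and ins_info[i][4]=='ZCB1-14':
--                 be_14_25.append(ins_info[i])
--             elif ins_info[i][3]=='40m' and ins_info[i][4]=='ZCB1-14':
--                 be_14_40.append(ins_info[i])
--             elif ins_info[i][3]=='25m' and ins_info[i][4]=='ZCB1-15':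
--                 be_15_25.append(ins_info[i])
--             elif ins_info[i][3]=='40m' and ins_info[i][4]=='ZCB1-15':
--                 be_15_40.append(ins_info[i])
--         installed_info=[len(be_12_25),len(be_12_40),len(be_13_25),len(be_13_40),\
--             len(be_14_25),len(be_14_40),len(be_15_25),len(be_15_40)]
--         return installed_info
-- ===== SOURCE B (Python) =====
-- CATS = [('25m', 'ZCB1-12'), ('40m', 'ZCB1-12'),
--         ('25m', 'ZCB1-13'), ('40m', 'ZCB1-13'),
--         ('25m', 'ZCB1-14'), ('40m', 'ZCB1-14'),
--         ('25m', 'ZCB1-15'), ('40m', 'ZCB1-15')]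
--
-- def ins_classification(ins_info):
--     '''将已浇筑的梁片信息进行分类'''
--     if len(ins_info) == 0:
--         return None
--     return [sum(1 for r in ins_info if r[3] == ln and r[4] == ty)
--             for (ln, ty) in CATS]
-- ===== Notes on version B (the rewrite author's own statement) =====
-- stated objective: simpler
-- what changed: The single pass that appends rows to eight accumulator lists and then takes their lengths is replaced by a comprehension over the eight (length,type) categories, each counted by an independent filtered sum; no row lists are materialised.
import Mathlib
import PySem

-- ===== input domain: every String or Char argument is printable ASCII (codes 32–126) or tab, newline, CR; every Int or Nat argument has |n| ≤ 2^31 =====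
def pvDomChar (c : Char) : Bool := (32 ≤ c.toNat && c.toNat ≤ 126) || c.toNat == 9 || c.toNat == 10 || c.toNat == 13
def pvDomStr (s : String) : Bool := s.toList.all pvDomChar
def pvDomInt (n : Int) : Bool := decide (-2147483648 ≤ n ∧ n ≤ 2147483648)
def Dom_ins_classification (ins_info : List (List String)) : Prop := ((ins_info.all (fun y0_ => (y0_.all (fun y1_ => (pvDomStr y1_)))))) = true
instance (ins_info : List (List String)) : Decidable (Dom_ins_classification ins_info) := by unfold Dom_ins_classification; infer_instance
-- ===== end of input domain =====

-- B replaces A's single pass over eight accumulator lists by one count per (length,type) category; objective: simpler.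

-- ===== PORT A =====
-- row access ins_info[i][3] / [i][4]: exact when the row has length ≥ 5 (ensured by Pre_)
def pvG3 (r : List String) : String := (PySem.List.pyGet? r 3).getD ""
def pvG4 (r : List String) : String := (PySem.List.pyGet? r 4).getD ""

structure PvBeams where
  b1 : List (List String)
  b2 : List (List String)
  b3 : List (List String)
  b4 : List (List String)
  b5 : List (List String)
  b6 : List (List String)
  b7 : List (List String)
  b8 : List (List String)

def pvUpdate (st : PvBeams) (r : List String) : PvBeams :=
  if pvG3 r == "25m" && pvG4 r == "ZCB1-12" then { st with b1 := st.b1 ++ [r] }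
  else if pvG3 r == "40m" && pvG4 r == "ZCB1-12" then { st with b2 := st.b2 ++ [r] }
  else if pvG3 r == "25m" && pvG4 r == "ZCB1-13" then { st with b3 := st.b3 ++ [r] }
  else if pvG3 r == "40m" && pvG4 r == "ZCB1-13" then { st with b4 := st.b4 ++ [r] }
  else if pvG3 r == "25m" && pvG4 r == "ZCB1-14" then { st with b5 := st.b5 ++ [r] }
  else if pvG3 r == "40m" && pvG4 r == "ZCB1-14" then { st with b6 := st.b6 ++ [r] }
  else if pvG3 r == "25m" && pvG4 r == "ZCB1-15" then { st with b7 := st.b7 ++ [r] }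
  else if pvG3 r == "40m" && pvG4 r == "ZCB1-15" then { st with b8 := st.b8 ++ [r] }
  else st

def pvLoop : List (List String) → PvBeams → PvBeams
  | [], st => st
  | r :: rs, st => pvLoop rs (pvUpdate st r)

def ins_classification (ins_info : List (List String)) : Option (List Int) :=
  if ins_info.length == 0 then none  -- Python's 'pass' branch: the function returns None
  else
    let st := pvLoop ins_info ⟨[], [], [], [], [], [], [], []⟩
    some [(st.b1.length : Int), (st.b2.length : Int), (st.b3.length : Int), (st.b4.length : Int),
          (st.b5.length : Int), (st.b6.length : Int), (st.b7.length : Int), (st.b8.length : Int)]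

-- ===== PORT B =====
def pvCats : List (String × String) :=
  [("25m", "ZCB1-12"), ("40m", "ZCB1-12"), ("25m", "ZCB1-13"), ("40m", "ZCB1-13"),
   ("25m", "ZCB1-14"), ("40m", "ZCB1-14"), ("25m", "ZCB1-15"), ("40m", "ZCB1-15")]

-- sum(1 for r in ins_info if r[3]==ln and r[4]==ty)
def pvCount (ins_info : List (List String)) (ln ty : String) : Int :=
  (ins_info.countP (fun r => pvG3 r == ln && pvG4 r == ty) : Int)

def ins_classification_alt (ins_info : List (List String)) : Option (List Int) :=
  if ins_info.length == 0 then none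
  else some (pvCats.map (fun c => pvCount ins_info c.1 c.2))

-- ===== PRECONDITION & SPEC =====
-- Pre_ excludes exactly the inputs where Python A raises IndexError: a row shorter than 4 entries,
-- or a row of length 4 whose entry 3 is '25m'/'40m' (only then does the short-circuited 'and' reach r[4]).
def Pre_ins_classification (ins_info : List (List String)) : Prop :=
  ∀ r ∈ ins_info, 4 ≤ r.length ∧ ((pvG3 r = "25m" ∨ pvG3 r = "40m") → 5 ≤ r.length)
instance (ins_info : List (List String)) : Decidable (Pre_ins_classification ins_info) := by unfold Pre_ins_classification; infer_instance

def pvWitness_ins_classification : List (List String) :=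
  [["a", "b", "c", "25m", "ZCB1-12"], ["a", "b", "c", "40m", "ZCB1-15"]]

def Spec_ins_classification (ins_info : List (List String)) (out : Option (List Int)) : Prop := out = ins_classification_alt ins_info
instance (ins_info : List (List String)) (out : Option (List Int)) : Decidable (Spec_ins_classification ins_info out) := by unfold Spec_ins_classification; infer_instance

-- ===== CLAIM (what is proved, stated in full; the proofs are below) =====
def Claim_equal_ins_classification : Prop := ∀ (ins_info : List (List String)), Dom_ins_classification ins_info → Pre_ins_classification ins_info → Spec_ins_classification ins_info (ins_classification ins_info)

-- ===== LEMMAS AND PROOFS =====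
def pvP (ln ty : String) (r : List String) : Bool := pvG3 r == ln && pvG4 r == ty

lemma pvUpdate_len (st : PvBeams) (r : List String) :
    (pvUpdate st r).b1.length = st.b1.length + (if pvP "25m" "ZCB1-12" r then 1 else 0) ∧
    (pvUpdate st r).b2.length = st.b2.length + (if pvP "40m" "ZCB1-12" r then 1 else 0) ∧
    (pvUpdate st r).b3.length = st.b3.length + (if pvP "25m" "ZCB1-13" r then 1 else 0) ∧
    (pvUpdate st r).b4.length = st.b4.length + (if pvP "40m" "ZCB1-13" r then 1 else 0) ∧
    (pvUpdate st r).b5.length = st.b5.length + (if pvP "25m" "ZCB1-14" r then 1 else 0) ∧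
    (pvUpdate st r).b6.length = st.b6.length + (if pvP "40m" "ZCB1-14" r then 1 else 0) ∧
    (pvUpdate st r).b7.length = st.b7.length + (if pvP "25m" "ZCB1-15" r then 1 else 0) ∧
    (pvUpdate st r).b8.length = st.b8.length + (if pvP "40m" "ZCB1-15" r then 1 else 0) := by
  unfold pvUpdate pvP
  split_ifs <;> simp_all

lemma pvLoop_len (rows : List (List String)) : ∀ st : PvBeams,
    (pvLoop rows st).b1.length = st.b1.length + rows.countP (pvP "25m" "ZCB1-12") ∧
    (pvLoop rows st).b2.length = st.b2.length + rows.countP (pvP "40m" "ZCB1-12") ∧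
    (pvLoop rows st).b3.length = st.b3.length + rows.countP (pvP "25m" "ZCB1-13") ∧
    (pvLoop rows st).b4.length = st.b4.length + rows.countP (pvP "40m" "ZCB1-13") ∧
    (pvLoop rows st).b5.length = st.b5.length + rows.countP (pvP "25m" "ZCB1-14") ∧
    (pvLoop rows st).b6.length = st.b6.length + rows.countP (pvP "40m" "ZCB1-14") ∧
    (pvLoop rows st).b7.length = st.b7.length + rows.countP (pvP "25m" "ZCB1-15") ∧
    (pvLoop rows st).b8.length = st.b8.length + rows.countP (pvP "40m" "ZCB1-15") := by
  induction rows with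
  | nil => intro st; simp [pvLoop]
  | cons r rs ih =>
    intro st
    obtain ⟨h1, h2, h3, h4, h5, h6, h7, h8⟩ := ih (pvUpdate st r)
    obtain ⟨u1, u2, u3, u4, u5, u6, u7, u8⟩ := pvUpdate_len st r
    simp only [pvLoop, List.countP_cons, h1, h2, h3, h4, h5, h6, h7, h8,
               u1, u2, u3, u4, u5, u6, u7, u8]
    refine ⟨?_, ?_, ?_, ?_, ?_, ?_, ?_, ?_⟩ <;> split_ifs <;> omega

-- ===== VERDICT (by name: the statement is the Claim_ definition above) =====
theorem ins_classification_spec : Claim_equal_ins_classification := by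
  intro ins_info _ _
  unfold Spec_ins_classification ins_classification ins_classification_alt
  split_ifs with h
  · rfl
  · obtain ⟨h1, h2, h3, h4, h5, h6, h7, h8⟩ := pvLoop_len ins_info ⟨[], [], [], [], [], [], [], []⟩
    unfold pvP at h1 h2 h3 h4 h5 h6 h7 h8
    simp [pvCats, pvCount, h1, h2, h3, h4, h5, h6, h7, h8]
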